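-- pv_equiv track=rewrite | github.com/leandro-torres-pro/lista-exercicios | lista0102.py | printElevador
-- ===== SOURCE A (Python) =====
-- def printElevador(dados):
--     quantA = 0
--     quantB = 0
--     quantC = 0
--     usoElevadores = []
--     for i in range(len(dados)):
--         for ii in range(len(dados[i])):
--             if dados[i][ii] == 'A':
--                 quantA = quantA + 1
--             elif dados[i][ii] == 'B':
--                 quantB =  quantB + 1
--             elif dados[i][ii] == 'C':
--                 quantC = quantC + 1
--     usoElevadores.insert(0, quantA)
--     usoElevadores.insert(1, quantB)
--     usoElevadores.insert(2, quantC)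
--     return usoElevadores
-- ===== SOURCE B (Python) =====
-- def printElevador(dados):
--     return [sum(row.count(c) for row in dados) for c in 'ABC']
-- ===== Notes on version B (the rewrite author's own statement) =====
-- stated objective: idiomatic
-- what changed: Replaces the single branching pass with three manual accumulators and an if/elif chain by three independent scans, one per letter, each summing the built-in row.count over the rows.
import Mathlib
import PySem

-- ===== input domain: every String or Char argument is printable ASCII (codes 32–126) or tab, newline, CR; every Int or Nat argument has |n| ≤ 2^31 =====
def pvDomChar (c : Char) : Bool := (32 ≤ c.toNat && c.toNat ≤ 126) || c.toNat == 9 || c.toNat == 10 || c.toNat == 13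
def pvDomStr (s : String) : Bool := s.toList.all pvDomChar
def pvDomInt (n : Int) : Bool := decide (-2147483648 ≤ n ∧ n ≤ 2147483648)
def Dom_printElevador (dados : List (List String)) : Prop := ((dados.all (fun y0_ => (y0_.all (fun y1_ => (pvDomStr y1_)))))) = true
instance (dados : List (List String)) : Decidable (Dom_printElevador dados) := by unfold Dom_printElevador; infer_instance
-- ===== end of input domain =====

-- B replaces A's single branching pass with three accumulators by one independent
-- counting scan per letter (idiomatic; same asymptotic cost).

-- ===== PORT A =====
def printElevador (dados : List (List String)) : List Int :=
  let st : Int × Int × Int :=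
    (PySem.List.pyRange 0 (dados.length : Int) 1).foldl (fun (acc : Int × Int × Int) i =>
      let row := PySem.List.pyGetD dados i []
      (PySem.List.pyRange 0 (row.length : Int) 1).foldl (fun (acc : Int × Int × Int) ii =>
        let x := PySem.List.pyGetD row ii ""
        if x == "A" then (acc.1 + 1, acc.2.1, acc.2.2)
        else if x == "B" then (acc.1, acc.2.1 + 1, acc.2.2)
        else if x == "C" then (acc.1, acc.2.1, acc.2.2 + 1)
        else acc) acc) (0, 0, 0)
  -- usoElevadores.insert(0/1/2, …) on an initially empty list builds [quantA, quantB, quantC]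
  [st.1, st.2.1, st.2.2]

-- ===== PORT B =====
def printElevador_alt (dados : List (List String)) : List Int :=
  ["A", "B", "C"].map (fun c => (dados.map (fun row => (row.count c : Int))).sum)

-- ===== PRECONDITION & SPEC =====
def Spec_printElevador (dados : List (List String)) (out : List Int) : Prop := out = printElevador_alt dados
instance (dados : List (List String)) (out : List Int) : Decidable (Spec_printElevador dados out) := by unfold Spec_printElevador; infer_instance

-- ===== CLAIM (what is proved, stated in full; the proofs are below) =====
def Claim_equal_printElevador : Prop := ∀ (dados : List (List String)), Dom_printElevador dados → Spec_printElevador dados (printElevador dados)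

-- ===== LEMMAS AND PROOFS =====

def pvStep (acc : Int × Int × Int) (x : String) : Int × Int × Int :=
  if x == "A" then (acc.1 + 1, acc.2.1, acc.2.2)
  else if x == "B" then (acc.1, acc.2.1 + 1, acc.2.2)
  else if x == "C" then (acc.1, acc.2.1, acc.2.2 + 1)
  else acc

theorem pv_row_foldl (row : List String) (acc : Int × Int × Int) :
    row.foldl pvStep acc =
      (acc.1 + row.count "A", acc.2.1 + row.count "B", acc.2.2 + row.count "C") := by
  induction row generalizing acc with
  | nil => simp
  | cons x xs ih =>
    rw [List.foldl_cons, ih]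
    unfold pvStep
    split_ifs with hA hB hC <;>
      refine Prod.ext ?_ (Prod.ext ?_ ?_) <;> simp_all <;> omega

theorem pv_outer_foldl (dados : List (List String)) (acc : Int × Int × Int) :
    dados.foldl (fun acc row => row.foldl pvStep acc) acc =
      (acc.1 + (dados.map (fun row => (row.count "A" : Int))).sum,
       acc.2.1 + (dados.map (fun row => (row.count "B" : Int))).sum,
       acc.2.2 + (dados.map (fun row => (row.count "C" : Int))).sum) := by
  induction dados generalizing acc with
  | nil => simp
  | cons r rs ih =>
    rw [List.foldl_cons, pv_row_foldl, ih]
    refine Prod.ext ?_ (Prod.ext ?_ ?_) <;> simp <;> ring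

-- ===== VERDICT (by name: the statement is the Claim_ definition above) =====
theorem printElevador_spec : Claim_equal_printElevador := by
  intro dados _
  show printElevador dados = printElevador_alt dados
  unfold printElevador printElevador_alt
  rw [PySem.List.foldl_pyRange_zero_pyGetD' dados ([] : List String)
    (fun (acc : Int × Int × Int) row =>
      (PySem.List.pyRange 0 (row.length : Int) 1).foldl (fun acc ii =>
        let x := PySem.List.pyGetD row ii ""
        if x == "A" then (acc.1 + 1, acc.2.1, acc.2.2)
        else if x == "B" then (acc.1, acc.2.1 + 1, acc.2.2)
        else if x == "C" then (acc.1, acc.2.1, acc.2.2 + 1)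
        else acc) acc) (0, 0, 0)]
  have hin : ∀ (row : List String) (acc : Int × Int × Int),
      (PySem.List.pyRange 0 (row.length : Int) 1).foldl (fun acc ii =>
        let x := PySem.List.pyGetD row ii ""
        if x == "A" then (acc.1 + 1, acc.2.1, acc.2.2)
        else if x == "B" then (acc.1, acc.2.1 + 1, acc.2.2)
        else if x == "C" then (acc.1, acc.2.1, acc.2.2 + 1)
        else acc) acc = row.foldl pvStep acc := by
    intro row acc
    have hfun : (fun (acc : Int × Int × Int) ii =>
        let x := PySem.List.pyGetD row ii ""
        if x == "A" then (acc.1 + 1, acc.2.1, acc.2.2)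
        else if x == "B" then (acc.1, acc.2.1 + 1, acc.2.2)
        else if x == "C" then (acc.1, acc.2.1, acc.2.2 + 1)
        else acc) = (fun (acc : Int × Int × Int) ii => pvStep acc (PySem.List.pyGetD row ii "")) := rfl
    rw [hfun, PySem.List.foldl_pyRange_zero_pyGetD' row "" pvStep acc]
  simp only [hin, pv_outer_foldl]
  simp
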